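-- pv_equiv track=rewrite | github.com/arlegotin/eml-symbolic-regression | src/eml_symbolic_regression/campaign.py | _strengths_paragraph
-- ===== SOURCE A (Python) =====
-- from typing import Any, Mapping
--
-- def _count_phrase(count: int, singular: str, plural: str | None = None) -> str:
--     word = singular if count == 1 else (plural or f"{singular}s")
--     return f"{count} {word}"
--
-- def _strengths_paragraph(runs: list[Mapping[str, Any]], counts: Mapping[str, Any]) -> str:
--     recovered = int(counts.get("verifier_recovered", 0))
--     same_ast = int(counts.get("same_ast_return", 0))
--     equivalent = int(counts.get("verified_equivalent_ast", 0))
--     total = int(counts.get("total", 0))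
--     blind_runs = [run for run in runs if run.get("start_mode") == "blind"]
--     warm_runs = [run for run in runs if run.get("start_mode") == "warm_start"]
--     compile_runs = [run for run in runs if run.get("start_mode") == "compile"]
--     catalog_runs = [run for run in runs if run.get("start_mode") == "catalog"]
--     perturbed_runs = [run for run in runs if run.get("start_mode") == "perturbed_tree"]
--     scaffolded_blind = sum(1 for run in blind_runs if run.get("evidence_class") == "scaffolded_blind_training_recovered")
--     pure_blind = sum(1 for run in blind_runs if run.get("evidence_class") == "blind_training_recovered")
--     repaired = sum(1 for run in runs if run.get("classification") == "repaired_candidate")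
--     blind_recovered = sum(1 for run in blind_runs if run.get("claim_status") == "recovered")
--
--     if blind_runs and not (warm_runs or compile_runs or catalog_runs or perturbed_runs):
--         if scaffolded_blind:
--             return (
--                 f"This campaign shows the strongest current bounded blind-training behavior in this bundle: "
--                 f"{recovered}/{total} blind runs passed verifier-owned recovery, and all {scaffolded_blind} recovered rows are "
--                 "scaffolded blind recoveries. Read these results as bounded scaffolded-training evidence, not as pure random-initialized "
--                 "blind discovery."
--             )
--         repaired_note = f", plus {_count_phrase(repaired, 'repaired candidate')}" if repaired else ""
--         return (
--             f"This campaign measures the current pure random-initialized blind boundary: "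
--             f"{recovered}/{total} blind runs passed verifier-owned recovery, including "
--             f"{_count_phrase(pure_blind, 'threshold-eligible pure blind recovery', 'threshold-eligible pure blind recoveries')}"
--             f"{repaired_note}. "
--             "These rows are recovery-boundary evidence, not warm-start basin evidence."
--         )
--
--     if perturbed_runs and not (blind_runs or warm_runs or compile_runs or catalog_runs):
--         return (
--             f"This campaign isolates the perturbed true-tree basin: {recovered}/{total} perturbed runs passed verifier-owned recovery, "
--             f"with {same_ast} same-AST returns, {equivalent} verified-equivalent returns, and {repaired} repaired candidates. "
--             "Those outcomes demonstrate local basin and repair behavior, not blind-discovery performance."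
--         )
--
--     if warm_runs and not (blind_runs or compile_runs or catalog_runs or perturbed_runs):
--         return (
--             f"This campaign isolates warm-start recovery behavior: {recovered}/{total} runs passed verifier-owned recovery, "
--             f"with {same_ast} returns to the same compiled EML AST and {equivalent} verified-equivalent returns. "
--             "Those are recovery and basin checks, not blind-discovery claims."
--         )
--
--     return (
--         f"This campaign shows the strongest current mixed-regime behavior when the EML representation is verified after snapping: "
--         f"{recovered}/{total} runs passed verifier-owned recovery. It includes {blind_recovered}/{len(blind_runs) if blind_runs else 0} "
--         f"blind recoveries, {same_ast} same-AST exact returns, and {equivalent} verified-equivalent exact returns. "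
--         "Those evidence paths remain separated in the tables so blind discovery, warm-start basin behavior, and non-training diagnostics are "
--         "not merged into one claim."
--     )
-- ===== SOURCE B (Python) =====
-- from typing import Any, Mapping
--
-- def _count_phrase(count: int, singular: str, plural: str | None = None) -> str:
--     word = singular if count == 1 else (plural or f"{singular}s")
--     return f"{count} {word}"
--
-- def _strengths_paragraph(runs: list[Mapping[str, Any]], counts: Mapping[str, Any]) -> str:
--     # single pass over runs: all mode counts and sub-counts accumulated together
--     n_blind = n_warm = n_compile = n_catalog = n_perturbed = 0
--     scaffolded_blind = pure_blind = repaired = blind_recovered = 0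
--     for run in runs:
--         mode = run.get("start_mode")
--         if mode == "blind":
--             n_blind += 1
--             if run.get("evidence_class") == "scaffolded_blind_training_recovered":
--                 scaffolded_blind += 1
--             if run.get("evidence_class") == "blind_training_recovered":
--                 pure_blind += 1
--             if run.get("claim_status") == "recovered":
--                 blind_recovered += 1
--         elif mode == "warm_start":
--             n_warm += 1
--         elif mode == "compile":
--             n_compile += 1
--         elif mode == "catalog":
--             n_catalog += 1
--         elif mode == "perturbed_tree":
--             n_perturbed += 1
--         if run.get("classification") == "repaired_candidate":
--             repaired += 1
--
--     recovered = int(counts.get("verifier_recovered", 0))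
--     same_ast = int(counts.get("same_ast_return", 0))
--     equivalent = int(counts.get("verified_equivalent_ast", 0))
--     total = int(counts.get("total", 0))
--
--     if n_blind and not (n_warm or n_compile or n_catalog or n_perturbed):
--         if scaffolded_blind:
--             return (
--                 f"This campaign shows the strongest current bounded blind-training behavior in this bundle: "
--                 f"{recovered}/{total} blind runs passed verifier-owned recovery, and all {scaffolded_blind} recovered rows are "
--                 "scaffolded blind recoveries. Read these results as bounded scaffolded-training evidence, not as pure random-initialized "
--                 "blind discovery."
--             )
--         repaired_note = f", plus {_count_phrase(repaired, 'repaired candidate')}" if repaired else ""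
--         return (
--             f"This campaign measures the current pure random-initialized blind boundary: "
--             f"{recovered}/{total} blind runs passed verifier-owned recovery, including "
--             f"{_count_phrase(pure_blind, 'threshold-eligible pure blind recovery', 'threshold-eligible pure blind recoveries')}"
--             f"{repaired_note}. "
--             "These rows are recovery-boundary evidence, not warm-start basin evidence."
--         )
--
--     if n_perturbed and not (n_blind or n_warm or n_compile or n_catalog):
--         return (
--             f"This campaign isolates the perturbed true-tree basin: {recovered}/{total} perturbed runs passed verifier-owned recovery, "
--             f"with {same_ast} same-AST returns, {equivalent} verified-equivalent returns, and {repaired} repaired candidates. "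
--             "Those outcomes demonstrate local basin and repair behavior, not blind-discovery performance."
--         )
--
--     if n_warm and not (n_blind or n_compile or n_catalog or n_perturbed):
--         return (
--             f"This campaign isolates warm-start recovery behavior: {recovered}/{total} runs passed verifier-owned recovery, "
--             f"with {same_ast} returns to the same compiled EML AST and {equivalent} verified-equivalent returns. "
--             "Those are recovery and basin checks, not blind-discovery claims."
--         )
--
--     return (
--         f"This campaign shows the strongest current mixed-regime behavior when the EML representation is verified after snapping: "
--         f"{recovered}/{total} runs passed verifier-owned recovery. It includes {blind_recovered}/{n_blind} "
--         f"blind recoveries, {same_ast} same-AST exact returns, and {equivalent} verified-equivalent exact returns. "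
--         "Those evidence paths remain separated in the tables so blind discovery, warm-start basin behavior, and non-training diagnostics are "
--         "not merged into one claim."
--     )
-- ===== Notes on version B (the rewrite author's own statement) =====
-- stated objective: alternative
-- what changed: Replaces five filter comprehensions plus four separate counting scans (up to nine traversals of runs) with a single loop that accumulates all mode counts and sub-counts in one pass, keeping the identical return cascade; not measurably faster in CPython (comprehensions run at C speed).
import Mathlib
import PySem

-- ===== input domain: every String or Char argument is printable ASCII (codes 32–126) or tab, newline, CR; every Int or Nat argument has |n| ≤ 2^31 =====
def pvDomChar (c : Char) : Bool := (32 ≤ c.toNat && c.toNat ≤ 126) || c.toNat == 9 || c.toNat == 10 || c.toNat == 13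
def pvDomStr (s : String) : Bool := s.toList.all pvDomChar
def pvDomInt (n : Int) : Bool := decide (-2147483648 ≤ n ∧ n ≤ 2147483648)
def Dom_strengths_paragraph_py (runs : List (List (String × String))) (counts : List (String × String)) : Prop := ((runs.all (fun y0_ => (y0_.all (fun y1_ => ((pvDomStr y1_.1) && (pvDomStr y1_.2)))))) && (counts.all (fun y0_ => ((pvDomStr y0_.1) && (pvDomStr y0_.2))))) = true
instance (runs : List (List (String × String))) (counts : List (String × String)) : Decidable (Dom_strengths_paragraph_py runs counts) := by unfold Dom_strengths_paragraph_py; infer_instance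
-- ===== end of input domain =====

-- B builds all nine counts in one pass over runs instead of A's nine separate filter/sum scans; the return cascade and strings are unchanged (equal return value proved on Pre_: counts values that int() accepts).

-- ===== PORT A =====
-- _count_phrase; 'plural or f"{singular}s"': a None or empty plural falls through
def pvCountPhrase (count : Int) (singular : String) (plural : Option String) : String :=
  let word := if count == 1 then singular else
    (match plural with
     | some p => if p == "" then singular ++ "s" else p
     | none => singular ++ "s")
  PySem.Int.toStr count ++ " " ++ word

-- X.get(k): first match in the association list (the type convention's dict lookup)
def pvGet? (d : List (String × String)) (k : String) : Option String :=
  (d.find? (fun kv => kv.1 == k)).map (fun kv => kv.2)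

-- int(counts.get(k, 0)); the .getD 0 arm is unreachable under Pre_ (int() would raise)
def pvIntGet (counts : List (String × String)) (k : String) : Int :=
  match pvGet? counts k with
  | none => 0
  | some s => (PySem.Int.ofStr? s).getD 0

def strengths_paragraph_py (runs : List (List (String × String))) (counts : List (String × String)) : String :=
  let recovered := pvIntGet counts "verifier_recovered"
  let same_ast := pvIntGet counts "same_ast_return"
  let equivalent := pvIntGet counts "verified_equivalent_ast"
  let total := pvIntGet counts "total"
  let blind_runs := runs.filter (fun r => pvGet? r "start_mode" == some "blind")
  let warm_runs := runs.filter (fun r => pvGet? r "start_mode" == some "warm_start")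
  let compile_runs := runs.filter (fun r => pvGet? r "start_mode" == some "compile")
  let catalog_runs := runs.filter (fun r => pvGet? r "start_mode" == some "catalog")
  let perturbed_runs := runs.filter (fun r => pvGet? r "start_mode" == some "perturbed_tree")
  let scaffolded_blind : Int := blind_runs.foldl (fun acc r => if pvGet? r "evidence_class" == some "scaffolded_blind_training_recovered" then acc + 1 else acc) 0
  let pure_blind : Int := blind_runs.foldl (fun acc r => if pvGet? r "evidence_class" == some "blind_training_recovered" then acc + 1 else acc) 0
  let repaired : Int := runs.foldl (fun acc r => if pvGet? r "classification" == some "repaired_candidate" then acc + 1 else acc) 0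
  let blind_recovered : Int := blind_runs.foldl (fun acc r => if pvGet? r "claim_status" == some "recovered" then acc + 1 else acc) 0
  if !blind_runs.isEmpty && !(!warm_runs.isEmpty || !compile_runs.isEmpty || !catalog_runs.isEmpty || !perturbed_runs.isEmpty) then
    if scaffolded_blind != 0 then
      "This campaign shows the strongest current bounded blind-training behavior in this bundle: " ++
      PySem.Int.toStr recovered ++ "/" ++ PySem.Int.toStr total ++ " blind runs passed verifier-owned recovery, and all " ++ PySem.Int.toStr scaffolded_blind ++ " recovered rows are " ++
      "scaffolded blind recoveries. Read these results as bounded scaffolded-training evidence, not as pure random-initialized " ++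
      "blind discovery."
    else
      let repaired_note := if repaired != 0 then ", plus " ++ pvCountPhrase repaired "repaired candidate" none else ""
      "This campaign measures the current pure random-initialized blind boundary: " ++
      PySem.Int.toStr recovered ++ "/" ++ PySem.Int.toStr total ++ " blind runs passed verifier-owned recovery, including " ++
      pvCountPhrase pure_blind "threshold-eligible pure blind recovery" (some "threshold-eligible pure blind recoveries") ++
      repaired_note ++ ". " ++
      "These rows are recovery-boundary evidence, not warm-start basin evidence."
  else if !perturbed_runs.isEmpty && !(!blind_runs.isEmpty || !warm_runs.isEmpty || !compile_runs.isEmpty || !catalog_runs.isEmpty) then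
    "This campaign isolates the perturbed true-tree basin: " ++ PySem.Int.toStr recovered ++ "/" ++ PySem.Int.toStr total ++ " perturbed runs passed verifier-owned recovery, " ++
    "with " ++ PySem.Int.toStr same_ast ++ " same-AST returns, " ++ PySem.Int.toStr equivalent ++ " verified-equivalent returns, and " ++ PySem.Int.toStr repaired ++ " repaired candidates. " ++
    "Those outcomes demonstrate local basin and repair behavior, not blind-discovery performance."
  else if !warm_runs.isEmpty && !(!blind_runs.isEmpty || !compile_runs.isEmpty || !catalog_runs.isEmpty || !perturbed_runs.isEmpty) then
    "This campaign isolates warm-start recovery behavior: " ++ PySem.Int.toStr recovered ++ "/" ++ PySem.Int.toStr total ++ " runs passed verifier-owned recovery, " ++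
    "with " ++ PySem.Int.toStr same_ast ++ " returns to the same compiled EML AST and " ++ PySem.Int.toStr equivalent ++ " verified-equivalent returns. " ++
    "Those are recovery and basin checks, not blind-discovery claims."
  else
    "This campaign shows the strongest current mixed-regime behavior when the EML representation is verified after snapping: " ++
    PySem.Int.toStr recovered ++ "/" ++ PySem.Int.toStr total ++ " runs passed verifier-owned recovery. It includes " ++ PySem.Int.toStr blind_recovered ++ "/" ++
    PySem.Int.toStr (if !blind_runs.isEmpty then (blind_runs.length : Int) else 0) ++ " " ++
    "blind recoveries, " ++ PySem.Int.toStr same_ast ++ " same-AST exact returns, and " ++ PySem.Int.toStr equivalent ++ " verified-equivalent exact returns. " ++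
    "Those evidence paths remain separated in the tables so blind discovery, warm-start basin behavior, and non-training diagnostics are " ++
    "not merged into one claim."

-- ===== PORT B =====
structure PvTally where
  nb : Int
  nw : Int
  nc : Int
  ncat : Int
  np : Int
  sb : Int
  pb : Int
  rep : Int
  br : Int
deriving Repr, DecidableEq

-- the single pass of Source B: mode elif-chain plus the classification counter
def pvLoop : List (List (String × String)) → PvTally → PvTally
  | [], t => t
  | r :: rest, t =>
    let mode := pvGet? r "start_mode"
    let t1 :=
      if mode == some "blind" then
        { t with nb := t.nb + 1,
                 sb := if pvGet? r "evidence_class" == some "scaffolded_blind_training_recovered" then t.sb + 1 else t.sb,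
                 pb := if pvGet? r "evidence_class" == some "blind_training_recovered" then t.pb + 1 else t.pb,
                 br := if pvGet? r "claim_status" == some "recovered" then t.br + 1 else t.br }
      else if mode == some "warm_start" then { t with nw := t.nw + 1 }
      else if mode == some "compile" then { t with nc := t.nc + 1 }
      else if mode == some "catalog" then { t with ncat := t.ncat + 1 }
      else if mode == some "perturbed_tree" then { t with np := t.np + 1 }
      else t
    let t2 := if pvGet? r "classification" == some "repaired_candidate" then { t1 with rep := t1.rep + 1 } else t1
    pvLoop rest t2

def strengths_paragraph_py_alt (runs : List (List (String × String))) (counts : List (String × String)) : String :=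
  let t := pvLoop runs ⟨0, 0, 0, 0, 0, 0, 0, 0, 0⟩
  let recovered := pvIntGet counts "verifier_recovered"
  let same_ast := pvIntGet counts "same_ast_return"
  let equivalent := pvIntGet counts "verified_equivalent_ast"
  let total := pvIntGet counts "total"
  if t.nb != 0 && !(t.nw != 0 || t.nc != 0 || t.ncat != 0 || t.np != 0) then
    if t.sb != 0 then
      "This campaign shows the strongest current bounded blind-training behavior in this bundle: " ++
      PySem.Int.toStr recovered ++ "/" ++ PySem.Int.toStr total ++ " blind runs passed verifier-owned recovery, and all " ++ PySem.Int.toStr t.sb ++ " recovered rows are " ++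
      "scaffolded blind recoveries. Read these results as bounded scaffolded-training evidence, not as pure random-initialized " ++
      "blind discovery."
    else
      let repaired_note := if t.rep != 0 then ", plus " ++ pvCountPhrase t.rep "repaired candidate" none else ""
      "This campaign measures the current pure random-initialized blind boundary: " ++
      PySem.Int.toStr recovered ++ "/" ++ PySem.Int.toStr total ++ " blind runs passed verifier-owned recovery, including " ++
      pvCountPhrase t.pb "threshold-eligible pure blind recovery" (some "threshold-eligible pure blind recoveries") ++
      repaired_note ++ ". " ++
      "These rows are recovery-boundary evidence, not warm-start basin evidence."
  else if t.np != 0 && !(t.nb != 0 || t.nw != 0 || t.nc != 0 || t.ncat != 0) then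
    "This campaign isolates the perturbed true-tree basin: " ++ PySem.Int.toStr recovered ++ "/" ++ PySem.Int.toStr total ++ " perturbed runs passed verifier-owned recovery, " ++
    "with " ++ PySem.Int.toStr same_ast ++ " same-AST returns, " ++ PySem.Int.toStr equivalent ++ " verified-equivalent returns, and " ++ PySem.Int.toStr t.rep ++ " repaired candidates. " ++
    "Those outcomes demonstrate local basin and repair behavior, not blind-discovery performance."
  else if t.nw != 0 && !(t.nb != 0 || t.nc != 0 || t.ncat != 0 || t.np != 0) then
    "This campaign isolates warm-start recovery behavior: " ++ PySem.Int.toStr recovered ++ "/" ++ PySem.Int.toStr total ++ " runs passed verifier-owned recovery, " ++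
    "with " ++ PySem.Int.toStr same_ast ++ " returns to the same compiled EML AST and " ++ PySem.Int.toStr equivalent ++ " verified-equivalent returns. " ++
    "Those are recovery and basin checks, not blind-discovery claims."
  else
    "This campaign shows the strongest current mixed-regime behavior when the EML representation is verified after snapping: " ++
    PySem.Int.toStr recovered ++ "/" ++ PySem.Int.toStr total ++ " runs passed verifier-owned recovery. It includes " ++ PySem.Int.toStr t.br ++ "/" ++
    PySem.Int.toStr t.nb ++ " " ++
    "blind recoveries, " ++ PySem.Int.toStr same_ast ++ " same-AST exact returns, and " ++ PySem.Int.toStr equivalent ++ " verified-equivalent exact returns. " ++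
    "Those evidence paths remain separated in the tables so blind discovery, warm-start basin behavior, and non-training diagnostics are " ++
    "not merged into one claim."

-- ===== PRECONDITION & SPEC =====
def pvParses (counts : List (String × String)) (k : String) : Bool :=
  match pvGet? counts k with
  | none => true
  | some s => (PySem.Int.ofStr? s).isSome

-- Pre_ excludes exactly the inputs where Python A raises ValueError: a counts value for one of the four read keys that int() does not accept.
def Pre_strengths_paragraph_py (runs : List (List (String × String))) (counts : List (String × String)) : Prop :=
  (pvParses counts "verifier_recovered" && pvParses counts "same_ast_return" &&
   pvParses counts "verified_equivalent_ast" && pvParses counts "total") = true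

instance (runs : List (List (String × String))) (counts : List (String × String)) : Decidable (Pre_strengths_paragraph_py runs counts) := by unfold Pre_strengths_paragraph_py; infer_instance

def pvWitness_strengths_paragraph_py : (List (List (String × String))) × (List (String × String)) :=
  ([[("start_mode", "blind")]], [("total", "2"), ("verifier_recovered", "1")])

def Spec_strengths_paragraph_py (runs : List (List (String × String))) (counts : List (String × String)) (out : String) : Prop := out = strengths_paragraph_py_alt runs counts
instance (runs : List (List (String × String))) (counts : List (String × String)) (out : String) : Decidable (Spec_strengths_paragraph_py runs counts out) := by unfold Spec_strengths_paragraph_py; infer_instance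

-- ===== CLAIM (what is proved, stated in full; the proofs are below) =====
def Claim_equal_strengths_paragraph_py : Prop := ∀ (runs : List (List (String × String))) (counts : List (String × String)), Dom_strengths_paragraph_py runs counts → Pre_strengths_paragraph_py runs counts → Spec_strengths_paragraph_py runs counts (strengths_paragraph_py runs counts)

-- ===== LEMMAS AND PROOFS =====

def pvIsB (r : List (String × String)) : Bool := pvGet? r "start_mode" == some "blind"
def pvIsW (r : List (String × String)) : Bool := pvGet? r "start_mode" == some "warm_start"
def pvIsC (r : List (String × String)) : Bool := pvGet? r "start_mode" == some "compile"
def pvIsCat (r : List (String × String)) : Bool := pvGet? r "start_mode" == some "catalog"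
def pvIsP (r : List (String × String)) : Bool := pvGet? r "start_mode" == some "perturbed_tree"
def pvIsS (r : List (String × String)) : Bool := pvGet? r "evidence_class" == some "scaffolded_blind_training_recovered"
def pvIsPB (r : List (String × String)) : Bool := pvGet? r "evidence_class" == some "blind_training_recovered"
def pvIsR (r : List (String × String)) : Bool := pvGet? r "classification" == some "repaired_candidate"
def pvIsRec (r : List (String × String)) : Bool := pvGet? r "claim_status" == some "recovered"

theorem pvLoop_eq (runs : List (List (String × String))) (t : PvTally) :
    pvLoop runs t =
      { nb := t.nb + (runs.countP pvIsB : Int),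
        nw := t.nw + (runs.countP pvIsW : Int),
        nc := t.nc + (runs.countP pvIsC : Int),
        ncat := t.ncat + (runs.countP pvIsCat : Int),
        np := t.np + (runs.countP pvIsP : Int),
        sb := t.sb + (runs.countP (fun r => pvIsS r && pvIsB r) : Int),
        pb := t.pb + (runs.countP (fun r => pvIsPB r && pvIsB r) : Int),
        rep := t.rep + (runs.countP pvIsR : Int),
        br := t.br + (runs.countP (fun r => pvIsRec r && pvIsB r) : Int) } := by
  induction runs generalizing t with
  | nil => simp [pvLoop]
  | cons r rest ih =>
    simp only [pvLoop, ih, List.countP_cons, pvIsB, pvIsW, pvIsC, pvIsCat, pvIsP, pvIsS,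
      pvIsPB, pvIsR, pvIsRec, PvTally.mk.injEq]
    by_cases hb : pvGet? r "start_mode" == some "blind" <;>
    by_cases hw : pvGet? r "start_mode" == some "warm_start" <;>
    by_cases hc : pvGet? r "start_mode" == some "compile" <;>
    by_cases hcat : pvGet? r "start_mode" == some "catalog" <;>
    by_cases hp : pvGet? r "start_mode" == some "perturbed_tree" <;>
    simp_all <;> split_ifs <;> simp_all <;> omega

theorem pv_isEmpty_filter (p : List (String × String) → Bool) (l : List (List (String × String))) :
    (l.filter p).isEmpty = (((l.countP p : Nat) : Int) == 0) := by
  rw [List.countP_eq_length_filter]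
  cases h : l.filter p <;> simp <;> omega

theorem pv_foldl_count (p : List (String × String) → Bool) (l : List (List (String × String))) :
    l.foldl (fun acc r => if p r then acc + 1 else acc) (0 : Int) = (l.countP p : Int) := by
  rw [PySem.List.foldl_if_add_one]
  ring

theorem pv_if_count (n : Nat) : (if (!((n : Int) == 0)) = true then ((n : Nat) : Int) else 0) = ((n : Nat) : Int) := by
  split_ifs with h
  · rfl
  · simp at h; omega

-- ===== VERDICT (by name: the statement is the Claim_ definition above) =====
theorem strengths_paragraph_py_spec : Claim_equal_strengths_paragraph_py := by
  intro runs counts _ _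
  unfold Spec_strengths_paragraph_py strengths_paragraph_py strengths_paragraph_py_alt
  rw [pvLoop_eq]
  simp only [pv_foldl_count, List.countP_filter, ← List.countP_eq_length_filter,
    pv_isEmpty_filter, pv_if_count, pvIsB, pvIsS, pvIsPB, pvIsRec, zero_add]
  rfl
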